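-- pv_equiv track=rewrite | github.com/Ashiq-am/Data-Structures-Algorithm | 1.Python Algorithms/8.Bitwise Algorithms/1.Basic/69.Toggle all odd bits of a number/Toggle all odd bits of a number.py | evenbittogglenumber
-- ===== SOURCE A (Python) =====
-- def evenbittogglenumber(n):
--     # Generate number form of 101010...
--     # ..till of same order as n
--     res = 0;
--     count = 0;
--     temp = n
--
--     while (temp > 0):
--
--         # If bit is odd, then generate
--         # number and or with res
--         if (count % 2 == 0):
--             res = res | (1 << count)
--
--         count = count + 1
--         temp >>= 1
--
--     # Return toggled number
--     return n ^ res
-- ===== SOURCE B (Python) =====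
-- def evenbittogglenumber(n):
--     # Closed form: the 0b...0101 mask over the bit-length of n is (4**m - 1)//3,
--     # where m counts the even bit positions below n.bit_length().
--     if n <= 0:
--         return n
--     m = (n.bit_length() + 1) // 2
--     return n ^ ((4 ** m - 1) // 3)
-- ===== Notes on version B (the rewrite author's own statement) =====
-- stated objective: simpler
-- what changed: Replaces the bit-by-bit mask-building loop by a closed-form alternating mask computed arithmetically from n.bit_length(), with a natural guard returning non-positive n unchanged.
import Mathlib
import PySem

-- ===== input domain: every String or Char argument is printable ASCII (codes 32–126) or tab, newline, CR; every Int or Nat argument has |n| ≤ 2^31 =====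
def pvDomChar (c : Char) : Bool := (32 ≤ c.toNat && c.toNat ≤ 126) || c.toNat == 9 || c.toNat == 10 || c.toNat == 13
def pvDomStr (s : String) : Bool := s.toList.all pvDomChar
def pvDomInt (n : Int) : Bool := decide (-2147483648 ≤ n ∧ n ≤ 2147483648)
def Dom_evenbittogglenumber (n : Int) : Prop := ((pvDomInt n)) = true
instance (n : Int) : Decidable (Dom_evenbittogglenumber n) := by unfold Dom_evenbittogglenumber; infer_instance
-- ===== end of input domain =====

-- B replaces A's bit-by-bit mask loop with the closed-form mask (4**m - 1)//3 over n.bit_length(); simpler, same results.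

-- ===== PORT A =====
-- termination helper for the while loop: temp >>= 1 strictly shrinks a positive temp
theorem pvShiftToNatLt (t : Int) (h : 0 < t) : (t >>> (1 : Nat)).toNat < t.toNat := by
  cases t with
  | ofNat m =>
    show (Int.ofNat (m >>> 1)).toNat < (Int.ofNat m).toNat
    simp only [Nat.shiftRight_succ, Nat.shiftRight_zero, Int.ofNat_eq_natCast, Int.toNat_natCast]
    have hm : 0 < m := by rw [Int.ofNat_eq_natCast] at h; exact_mod_cast h
    omega
  | negSucc m => simp [Int.negSucc_not_pos] at h

-- the while loop of A; count is the loop counter (starts at 0, only incremented), kept as Nat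
def evenLoop (temp res : Int) (count : Nat) : Int :=
  if 0 < temp then
    evenLoop (temp >>> (1 : Nat))
      (if count % 2 = 0 then PySem.Int.bor res (1 <<< count) else res) (count + 1)
  else res
termination_by temp.toNat
decreasing_by exact pvShiftToNatLt _ (by assumption)

def evenbittogglenumber (n : Int) : Int :=
  PySem.Int.bxor n (evenLoop n 0 0)

-- ===== PORT B =====
def evenbittogglenumber_alt (n : Int) : Int :=
  if n ≤ 0 then n
  else
    let m := (PySem.Int.bitLength n + 1) / 2
    PySem.Int.bxor n (PySem.Int.floordiv (4 ^ m - 1) 3)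

-- ===== PRECONDITION & SPEC =====
def Spec_evenbittogglenumber (n : Int) (out : Int) : Prop := out = evenbittogglenumber_alt n
instance (n : Int) (out : Int) : Decidable (Spec_evenbittogglenumber n out) := by unfold Spec_evenbittogglenumber; infer_instance

-- ===== CLAIM (what is proved, stated in full; the proofs are below) =====
def Claim_equal_evenbittogglenumber : Prop := ∀ (n : Int), Dom_evenbittogglenumber n → Spec_evenbittogglenumber n (evenbittogglenumber n)

-- ===== LEMMAS AND PROOFS =====

-- A's loop indexed by the bit length instead of the shrinking value
def sizeLoop (s : Nat) (res : Int) (count : Nat) : Int :=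
  match s with
  | 0 => res
  | s + 1 => sizeLoop s (if count % 2 = 0 then PySem.Int.bor res (1 <<< count) else res) (count + 1)

theorem shiftr_one_nat (m : Nat) : ((m : Int) >>> (1 : Nat)) = ((m / 2 : Nat) : Int) := by
  show Int.ofNat (m >>> 1) = _
  simp [Nat.shiftRight_succ, Nat.shiftRight_zero]

theorem evenLoop_eq_sizeLoop : ∀ (m : Nat) (res : Int) (count : Nat),
    evenLoop (m : Int) res count = sizeLoop (PySem.Int.bitLength (m : Int)) res count := by
  intro m
  induction m using Nat.strong_induction_on with
  | _ m ih =>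
    intro res count
    rcases Nat.eq_zero_or_pos m with h0 | hpos
    · subst h0
      rw [evenLoop]
      simp [PySem.Int.bitLength_zero, sizeLoop]
    · rw [evenLoop, if_pos (by exact_mod_cast hpos), shiftr_one_nat,
        PySem.Int.bitLength_natCast hpos, sizeLoop,
        ih (m / 2) (Nat.div_lt_self hpos (by omega))]

theorem sizeLoop_closed : ∀ s < 33,
    sizeLoop s 0 0 = PySem.Int.floordiv (4 ^ ((s + 1) / 2) - 1) 3 := by decide

theorem bitLength_le_32 (n : Int) (h1 : 0 < n) (h2 : n ≤ 2147483648) :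
    PySem.Int.bitLength n < 33 := by
  by_contra h
  have hle := PySem.Int.two_pow_bitLength_le n (by omega)
  have : (2 : Nat) ^ 32 ≤ 2 ^ (PySem.Int.bitLength n - 1) :=
    Nat.pow_le_pow_right (by omega) (by omega)
  have : (2 : Nat) ^ 32 ≤ n.natAbs := le_trans this hle
  omega

-- ===== VERDICT (by name: the statement is the Claim_ definition above) =====
theorem evenbittogglenumber_spec : Claim_equal_evenbittogglenumber := by
  intro n hdom
  unfold Spec_evenbittogglenumber evenbittogglenumber evenbittogglenumber_alt
  by_cases hn : n ≤ 0
  · rw [evenLoop, if_neg (by omega), if_pos hn, PySem.Int.bxor_zero]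
  · rw [if_neg hn]
    have hpos : 0 < n := by omega
    have hdom' : n ≤ 2147483648 := by
      have := of_decide_eq_true hdom
      omega
    have hcast : n = ((n.toNat : Nat) : Int) := by omega
    rw [hcast, evenLoop_eq_sizeLoop,
      sizeLoop_closed _ (by rw [← hcast]; exact bitLength_le_32 n hpos hdom')]
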